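-- pv_equiv track=rewrite | github.com/Stealthmate/python-challenge | level32.py | scan_column
-- ===== SOURCE A (Python) =====
-- def scan_column(c: list[bool]) -> tuple[int, int]:
--     last_length = 0
--     seqs = []
--     for x in c:
--         if last_length > 0 and not x:
--             seqs.append(last_length)
--         last_length = last_length + 1 if x else 0
--     if last_length > 0:
--         seqs.append(last_length)
--     return len(seqs), last_length
-- ===== SOURCE B (Python) =====
-- def scan_column(c: list[bool]) -> tuple[int, int]:
--     # run count = number of rising edges (an element that is truthy while its predecessor is not);
--     # trailing run length = position of the first non-truthy element scanning from the right.
--     runs = sum(1 for prev, x in zip([False] + c, c) if x and not prev)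
--     tail = next((i for i, x in enumerate(reversed(c)) if not x), len(c))
--     return runs, tail
-- ===== Notes on version B (the rewrite author's own statement) =====
-- stated objective: alternative
-- what changed: Replaces A's stateful run-accumulating loop (which builds a list of run lengths) with two independent closed-form scans: the run count as the number of rising edges between each element and its predecessor, and the trailing run length as the position of the first non-true element scanning from the right.
import Mathlib
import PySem

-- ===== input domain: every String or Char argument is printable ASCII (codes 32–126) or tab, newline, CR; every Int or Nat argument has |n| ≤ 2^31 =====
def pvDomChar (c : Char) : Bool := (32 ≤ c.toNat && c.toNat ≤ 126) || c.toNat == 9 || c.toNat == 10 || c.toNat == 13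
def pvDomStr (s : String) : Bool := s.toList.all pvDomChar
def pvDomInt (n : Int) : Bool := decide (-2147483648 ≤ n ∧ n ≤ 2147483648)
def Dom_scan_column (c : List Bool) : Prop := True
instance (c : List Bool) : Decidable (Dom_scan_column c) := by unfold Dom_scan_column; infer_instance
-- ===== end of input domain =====

-- B replaces A's stateful run-accumulating loop with two independent scans:
-- run count = number of rising edges; trailing length = position of first non-true element from the right.

-- ===== PORT A =====
def scan_column (c : List Bool) : Int × Int :=
  let st := c.foldl (fun (st : Int × List Int) x =>
      ((if x then st.1 + 1 else 0),
       if st.1 > 0 ∧ x = false then st.2 ++ [st.1] else st.2))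
    ((0 : Int), ([] : List Int))
  let seqs := if st.1 > 0 then st.2 ++ [st.1] else st.2
  ((seqs.length : Int), st.1)

-- ===== PORT B =====
def scan_column_alt (c : List Bool) : Int × Int :=
  let runs : Int := (((false :: c).zip c).countP (fun p => p.2 && !p.1) : Int)
  let tail : Int :=
    match c.reverse.findIdx? (fun x => !x) with
    | some i => (i : Int)
    | none => (c.length : Int)
  (runs, tail)

-- ===== PRECONDITION & SPEC =====
def Spec_scan_column (c : List Bool) (out : Int × Int) : Prop := out = scan_column_alt c
instance (c : List Bool) (out : Int × Int) : Decidable (Spec_scan_column c out) := by unfold Spec_scan_column; infer_instance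

-- ===== CLAIM (what is proved, stated in full; the proofs are below) =====
def Claim_equal_scan_column : Prop := ∀ (c : List Bool), Dom_scan_column c → Spec_scan_column c (scan_column c)

-- ===== LEMMAS AND PROOFS =====

-- recursive characterisation of B's rising-edge count
def pvRuns (prev : Bool) : List Bool → Int
  | [] => 0
  | x :: t => (if x ∧ prev = false then 1 else 0) + pvRuns x t

theorem pvRuns_zip (c : List Bool) : ∀ prev : Bool,
    (((prev :: c).zip c).countP (fun p => p.2 && !p.1) : Int) = pvRuns prev c := by
  induction c with
  | nil => intro prev; simp [pvRuns]
  | cons x t ih =>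
    intro prev
    simp only [List.zip_cons_cons, List.countP_cons, pvRuns, ← ih x]
    by_cases hx : x <;> by_cases hp : prev <;> simp [hx, hp] <;> ring

-- B's tail expression equals the scalar left fold that A's last_length performs
theorem pvTail_eq (c : List Bool) : ∀ last : Int,
    c.foldl (fun (a : Int) x => if x then a + 1 else 0) last =
      (match c.reverse.findIdx? (fun x => !x) with
       | some i => (i : Int)
       | none => last + (c.length : Int)) := by
  induction c using List.reverseRecOn with
  | nil => intro last; simp
  | append_singleton t x ih =>
    intro last
    rw [List.foldl_append]
    simp only [List.foldl_cons, List.foldl_nil, List.reverse_append, List.reverse_singleton,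
      List.singleton_append, List.findIdx?_cons]
    cases x with
    | false => simp
    | true =>
      simp only [ih last, Bool.not_true]
      cases h : t.reverse.findIdx? (fun x => !x) with
      | some i => simp
      | none => simp; push_cast; ring

-- invariant for A's pair fold: count bookkeeping
theorem pvFold_inv (c : List Bool) : ∀ (last : Int) (seqs : List Int), 0 ≤ last →
    (let st := c.foldl (fun (st : Int × List Int) x =>
        ((if x then st.1 + 1 else 0),
         if st.1 > 0 ∧ x = false then st.2 ++ [st.1] else st.2)) (last, seqs)
     ((st.2.length : Int) + (if st.1 > 0 then 1 else 0)
        = (seqs.length : Int) + (if last > 0 then 1 else 0) + pvRuns (decide (last > 0)) c)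
     ∧ st.1 = c.foldl (fun (a : Int) x => if x then a + 1 else 0) last) := by
  induction c with
  | nil => intro last seqs _; simp [pvRuns]
  | cons x t ih =>
    intro last seqs hlast
    simp only [List.foldl_cons]
    have h1 : (0 : Int) ≤ if x then last + 1 else 0 := by split <;> omega
    have := ih (if x then last + 1 else 0)
      (if last > 0 ∧ x = false then seqs ++ [last] else seqs) h1
    refine ⟨?_, this.2⟩
    rw [this.1]
    have hd : decide (last > 0) = true ↔ last > 0 := by simp
    by_cases hx : x <;> by_cases hl : last > 0 <;>
      first | (simp [pvRuns, hx, hl, hlast]; ring) | simp [pvRuns, hx, hl, hlast]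

theorem pvTail_zero (c : List Bool) :
    c.foldl (fun (a : Int) x => if x then a + 1 else 0) 0 =
      (match c.reverse.findIdx? (fun x => !x) with
       | some i => (i : Int)
       | none => (c.length : Int)) := by
  rw [pvTail_eq c 0]
  cases h : c.reverse.findIdx? (fun x => !x) <;> simp

-- ===== VERDICT (by name: the statement is the Claim_ definition above) =====
theorem scan_column_spec : Claim_equal_scan_column := by
  intro c _
  unfold Spec_scan_column
  obtain ⟨h1, h2⟩ := pvFold_inv c 0 [] le_rfl
  simp only [List.length_nil, Nat.cast_zero] at h1
  norm_num at h1
  dsimp only [scan_column, scan_column_alt]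
  rw [Prod.mk.injEq]
  refine ⟨?_, ?_⟩
  · rw [pvRuns_zip c false, ← h1]
    split <;> simp
  · rw [h2, ← pvTail_zero]
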